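-- pv_equiv track=rewrite | github.com/Richtermnd/Exams | tasks/task05/homework/n5.py | f
-- ===== SOURCE A (Python) =====
-- def f(n):
--     a = n
--     r = ''
--     while a:
--         r += str(a % 3)
--         a //= 3
--     r = r[::-1]
--     r += str(n % 3)
--     return int(r, 3)
-- ===== SOURCE B (Python) =====
-- def f(n):
--     # Appending n's least-significant base-3 digit to its base-3 numeral
--     # multiplies the value by 3 and adds that digit.
--     return 3 * n + n % 3
-- ===== Notes on version B (the rewrite author's own statement) =====
-- stated objective: simpler
-- what changed: Replaces the digit-extraction loop, string reversal and base-3 reparse with the closed form 3*n + n%3, since appending the least-significant base-3 digit multiplies the value by 3 and adds that digit.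
import Mathlib
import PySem

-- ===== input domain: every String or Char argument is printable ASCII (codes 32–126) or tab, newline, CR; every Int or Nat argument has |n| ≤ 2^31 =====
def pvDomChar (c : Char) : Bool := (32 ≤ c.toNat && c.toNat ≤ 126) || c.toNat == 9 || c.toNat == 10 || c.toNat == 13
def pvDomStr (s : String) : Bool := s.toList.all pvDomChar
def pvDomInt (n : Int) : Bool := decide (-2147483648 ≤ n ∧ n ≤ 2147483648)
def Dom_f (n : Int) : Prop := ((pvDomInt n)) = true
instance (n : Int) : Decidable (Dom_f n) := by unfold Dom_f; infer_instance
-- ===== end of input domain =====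

-- B replaces A's digit loop + string reverse + base-3 reparse with the closed form 3*n + n%3;
-- Pre_f restricts to 0 ≤ n, since A's while-loop never terminates for negative n (-1//3 == -1).


-- ===== PORT A =====
-- int(r, 3): ported by hand; exact for nonempty strings of digits 0..2 with no sign/space,
-- which is the only shape r ever has here.
def parse3 (r : List Char) : Int :=
  r.foldl (fun acc c => acc * 3 + ((c.toNat : Int) - 48)) 0

-- the while-loop; fuel only makes it total (Pre_f excludes n < 0, where Python loops forever;
-- for 0 ≤ a the fuel n.natAbs + 1 is never exhausted)
def fLoop : Nat → Int → List Char → List Char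
  | 0, _, r => r
  | fuel + 1, a, r =>
    if a ≠ 0 then
      fLoop fuel (PySem.Int.floordiv a 3) (r ++ PySem.Int.toChars (PySem.Int.mod a 3))
    else r

def f (n : Int) : Int :=
  let r := fLoop (n.natAbs + 1) n []                    -- a = n; r = ''; while a: r += str(a%3); a //= 3
  let r2 := r.reverse                                   -- r = r[::-1]
  let r3 := r2 ++ PySem.Int.toChars (PySem.Int.mod n 3) -- r += str(n % 3)
  parse3 r3                                             -- int(r, 3)

-- ===== PORT B =====
def f_alt (n : Int) : Int := 3 * n + PySem.Int.mod n 3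

-- ===== PRECONDITION & SPEC =====
-- Pre_f excludes negative n, on which A's while-loop never terminates (a //= 3 stalls at -1).
def Pre_f (n : Int) : Prop := 0 ≤ n
instance (n : Int) : Decidable (Pre_f n) := by unfold Pre_f; infer_instance
def pvWitness_f : Int := 5

def Spec_f (n : Int) (out : Int) : Prop := out = f_alt n
instance (n : Int) (out : Int) : Decidable (Spec_f n out) := by unfold Spec_f; infer_instance

-- ===== CLAIM (what is proved, stated in full; the proofs are below) =====
def Claim_equal_f : Prop := ∀ (n : Int), Dom_f n → Pre_f n → Spec_f n (f n)

-- ===== LEMMAS AND PROOFS =====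

theorem parse3_append_one (L : List Char) (c : Char) :
    parse3 (L ++ [c]) = parse3 L * 3 + ((c.toNat : Int) - 48) := by
  simp [parse3]

theorem toChars_digit (d : Int) (h0 : 0 ≤ d) (h3 : d < 3) :
    PySem.Int.toChars d = [Char.ofNat (48 + d.toNat)] := by
  interval_cases d <;> decide

theorem digit_val (d : Int) (h0 : 0 ≤ d) (h3 : d < 3) :
    ((Char.ofNat (48 + d.toNat)).toNat : Int) - 48 = d := by
  interval_cases d <;> decide

theorem fLoop_prefix (fuel : Nat) : ∀ (a : Int) (r : List Char),
    fLoop fuel a r = r ++ fLoop fuel a [] := by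
  induction fuel with
  | zero => intro a r; simp [fLoop]
  | succ k ih =>
    intro a r
    by_cases h : a = 0
    · simp [fLoop, h]
    · simp only [fLoop, if_pos (by exact h), ne_eq]
      rw [ih _ (r ++ _), ih _ ([] ++ _)]
      simp [List.append_assoc]

theorem fLoop_val (fuel : Nat) : ∀ (a : Int), 0 ≤ a → a.toNat < fuel →
    parse3 (fLoop fuel a []).reverse = a := by
  induction fuel with
  | zero => intro a _ h; omega
  | succ k ih =>
    intro a ha hlt
    by_cases h : a = 0
    · simp [fLoop, h, parse3]
    · have hm0 : 0 ≤ PySem.Int.mod a 3 := by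
        rw [PySem.Int.mod_eq_emod_of_pos (by norm_num)]; omega
      have hm3 : PySem.Int.mod a 3 < 3 := by
        rw [PySem.Int.mod_eq_emod_of_pos (by norm_num)]; omega
      have hd0 : 0 ≤ PySem.Int.floordiv a 3 := by
        rw [PySem.Int.floordiv_eq_ediv_of_pos (by norm_num)]; omega
      have hdlt : (PySem.Int.floordiv a 3).toNat < k := by
        rw [PySem.Int.floordiv_eq_ediv_of_pos (by norm_num)]; omega
      simp only [fLoop, if_pos (by exact h), ne_eq]
      rw [fLoop_prefix, toChars_digit _ hm0 hm3, List.nil_append, List.singleton_append,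
        List.reverse_cons, parse3_append_one, ih _ hd0 hdlt, digit_val _ hm0 hm3]
      have := PySem.Int.floordiv_mul_add_mod a 3
      omega

-- ===== VERDICT (by name: the statement is the Claim_ definition above) =====
theorem f_spec : Claim_equal_f := by
  intro n _ hn
  unfold Spec_f f f_alt
  have hm0 : 0 ≤ PySem.Int.mod n 3 := by
    rw [PySem.Int.mod_eq_emod_of_pos (by norm_num)]; omega
  have hm3 : PySem.Int.mod n 3 < 3 := by
    rw [PySem.Int.mod_eq_emod_of_pos (by norm_num)]; omega
  simp only
  rw [toChars_digit _ hm0 hm3, parse3_append_one,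
    fLoop_val _ n hn (by omega), digit_val _ hm0 hm3]
  ring
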